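-- pv_equiv track=rewrite | github.com/al-noori/CPD_in_Emotion_Recognition | model/mcpd.py | group_cp_regions
-- ===== SOURCE A (Python) =====
-- def group_cp_regions(timestamps, indices, min_gap=1):
--     """Group nearby change points into (start, end) time regions"""
--     if len(indices) == 0:
--         return []
--     indices = sorted(indices)
--     regions = []
--     start_idx = indices[0]
--     last_time = timestamps[start_idx]
--     for idx in indices[1:]:
--         current_time = timestamps[idx]
--         if current_time - last_time > min_gap:
--             regions.append((timestamps[start_idx], last_time))
--             start_idx = idx
--         last_time = current_time
--     regions.append((timestamps[start_idx], last_time))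
--     return regions
-- ===== SOURCE B (Python) =====
-- def group_cp_regions(timestamps, indices, min_gap=1):
--     """Group nearby change points into (start, end) time regions.
--     Staged passes: map sorted indices to timestamps, collect break positions
--     where the gap between consecutive times exceeds min_gap, then read each
--     region straight off the boundary list."""
--     if len(indices) == 0:
--         return []
--     times = [timestamps[i] for i in sorted(indices)]
--     n = len(times)
--     breaks = [i for i in range(1, n) if times[i] - times[i - 1] > min_gap]
--     bounds = [0] + breaks + [n]
--     return [(times[a], times[b - 1]) for a, b in zip(bounds, bounds[1:])]
-- ===== Notes on version B (the rewrite author's own statement) =====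
-- stated objective: alternative
-- what changed: B replaces A's stateful single pass (pending (start_idx,last_time) flushed on each gap and once after the loop) by staged passes: map sorted indices to their timestamps, collect the break positions where consecutive times differ by more than min_gap in a comprehension, form the boundary list [0]+breaks+[n], and read each region off a zip of adjacent boundaries.
import Mathlib
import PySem

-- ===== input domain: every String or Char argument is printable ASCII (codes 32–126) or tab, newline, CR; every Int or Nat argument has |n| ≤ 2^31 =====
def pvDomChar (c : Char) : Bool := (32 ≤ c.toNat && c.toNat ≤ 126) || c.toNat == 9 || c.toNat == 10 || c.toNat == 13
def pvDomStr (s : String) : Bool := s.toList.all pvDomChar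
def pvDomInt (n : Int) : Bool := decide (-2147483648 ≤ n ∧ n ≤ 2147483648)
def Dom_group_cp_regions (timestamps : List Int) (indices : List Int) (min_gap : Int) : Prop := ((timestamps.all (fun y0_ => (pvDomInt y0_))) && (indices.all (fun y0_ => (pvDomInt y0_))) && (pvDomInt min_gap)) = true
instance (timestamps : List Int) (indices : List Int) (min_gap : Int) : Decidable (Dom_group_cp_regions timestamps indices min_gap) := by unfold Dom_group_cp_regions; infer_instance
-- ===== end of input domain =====

-- B rebuilds the grouping in staged passes (timestamps of sorted indices, then the list of
-- break positions, then regions read off a zip of adjacent boundaries) instead of A's single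
-- stateful pass with a final flush; same cost, alternative structure.

-- ===== PORT A =====
-- literal transliteration of A: sort, pending (start_idx, last_time), append-on-gap, final flush
def group_cp_regions (timestamps : List Int) (indices : List Int) (min_gap : Int) : List (Int × Int) :=
  if indices.length = 0 then []
  else
    let s := PySem.List.sorted indices id
    let start_idx := PySem.List.pyGetD s 0 0
    let last_time := PySem.List.pyGetD timestamps start_idx 0
    let st := (PySem.List.slice s (some 1) none).foldl
      (fun (st : Int × Int × List (Int × Int)) idx =>
        let current_time := PySem.List.pyGetD timestamps idx 0
        if current_time - st.2.1 > min_gap then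
          (idx, current_time, st.2.2 ++ [(PySem.List.pyGetD timestamps st.1 0, st.2.1)])
        else (st.1, current_time, st.2.2))
      (start_idx, last_time, ([] : List (Int × Int)))
    st.2.2 ++ [(PySem.List.pyGetD timestamps st.1 0, st.2.1)]

-- ===== PORT B =====
-- literal transliteration of B: times, break positions, boundary list, zip of adjacent bounds
def group_cp_regions_alt (timestamps : List Int) (indices : List Int) (min_gap : Int) : List (Int × Int) :=
  if indices.length = 0 then []
  else
    let times := (PySem.List.sorted indices id).map (fun i => PySem.List.pyGetD timestamps i 0)
    let n : Int := times.length
    let breaks := (PySem.List.pyRange 1 n 1).filter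
      (fun i => decide (PySem.List.pyGetD times i 0 - PySem.List.pyGetD times (i-1) 0 > min_gap))
    let bounds := 0 :: (breaks ++ [n])
    (bounds.zip bounds.tail).map
      (fun ab => (PySem.List.pyGetD times ab.1 0, PySem.List.pyGetD times (ab.2 - 1) 0))

-- ===== PRECONDITION & SPEC =====
-- Pre_ excludes exactly the inputs where Python A raises IndexError: some change-point index
-- out of range for timestamps (both A and B index timestamps by every element of indices).
def Pre_group_cp_regions (timestamps : List Int) (indices : List Int) (min_gap : Int) : Prop :=
  ∀ i ∈ indices, PySem.Raise.InRange timestamps.length i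
instance (timestamps : List Int) (indices : List Int) (min_gap : Int) : Decidable (Pre_group_cp_regions timestamps indices min_gap) := by unfold Pre_group_cp_regions; infer_instance

def pvWitness_group_cp_regions : List Int × List Int × Int := ([0, 5, 6], [2, 0, 1], 1)

def Spec_group_cp_regions (timestamps : List Int) (indices : List Int) (min_gap : Int) (out : List (Int × Int)) : Prop := out = group_cp_regions_alt timestamps indices min_gap
instance (timestamps : List Int) (indices : List Int) (min_gap : Int) (out : List (Int × Int)) : Decidable (Spec_group_cp_regions timestamps indices min_gap out) := by unfold Spec_group_cp_regions; infer_instance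

-- ===== CLAIM (what is proved, stated in full; the proofs are below) =====
def Claim_equal_group_cp_regions : Prop := ∀ (timestamps : List Int) (indices : List Int) (min_gap : Int), Dom_group_cp_regions timestamps indices min_gap → Pre_group_cp_regions timestamps indices min_gap → Spec_group_cp_regions timestamps indices min_gap (group_cp_regions timestamps indices min_gap)

-- ===== LEMMAS AND PROOFS =====

-- common reference recursion (region at a time): chop one region, recurse
def pvChop (min_gap : Int) (last : Int) : List Int → Int × List Int
  | [] => (last, [])
  | x :: xs => if x - last ≤ min_gap then pvChop min_gap x xs else (last, x :: xs)

theorem pvChop_length_le (min_gap last : Int) (xs : List Int) :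
    (pvChop min_gap last xs).2.length ≤ xs.length := by
  induction xs generalizing last with
  | nil => simp [pvChop]
  | cons x xs ih =>
    simp only [pvChop]
    split
    · exact (ih x).trans (by simp)
    · simp

def pvGo (min_gap : Int) : List Int → List (Int × Int)
  | [] => []
  | t :: rest =>
    (t, (pvChop min_gap t rest).1) :: pvGo min_gap (pvChop min_gap t rest).2
termination_by l => l.length
decreasing_by
  exact Nat.lt_succ_of_le (pvChop_length_le min_gap t rest)

-- ---- A side: A's fold equals pvGo over the mapped times ----

-- A's loop in time space: pending region (s, l), remaining times
def pvALoop (g : Int) (s l : Int) : List Int → List (Int × Int)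
  | [] => [(s, l)]
  | c :: ts => if c - l > g then (s, l) :: pvALoop g c c ts else pvALoop g s c ts

theorem pvFold_eq_aloop (timestamps : List Int) (g : Int) (ts : List Int) :
    ∀ (si l : Int) (regs : List (Int × Int)),
    (let st := ts.foldl
      (fun (st : Int × Int × List (Int × Int)) idx =>
        let current_time := PySem.List.pyGetD timestamps idx 0
        if current_time - st.2.1 > g then
          (idx, current_time, st.2.2 ++ [(PySem.List.pyGetD timestamps st.1 0, st.2.1)])
        else (st.1, current_time, st.2.2))
      (si, l, regs)
     st.2.2 ++ [(PySem.List.pyGetD timestamps st.1 0, st.2.1)])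
    = regs ++ pvALoop g (PySem.List.pyGetD timestamps si 0) l
        (ts.map (fun i => PySem.List.pyGetD timestamps i 0)) := by
  induction ts with
  | nil => intro si l regs; simp [pvALoop]
  | cons c ts ih =>
    intro si l regs
    simp only [List.foldl_cons, List.map_cons, pvALoop]
    by_cases h : PySem.List.pyGetD timestamps c 0 - l > g
    · simp only [if_pos h, ih]
      simp
    · simp only [if_neg h, ih]

theorem pvALoop_eq_go (g : Int) (ts : List Int) :
    ∀ (s l : Int),
    pvALoop g s l ts = (s, (pvChop g l ts).1) :: pvGo g (pvChop g l ts).2 := by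
  induction ts with
  | nil => intro s l; simp [pvALoop, pvChop, pvGo]
  | cons c ts ih =>
    intro s l
    simp only [pvALoop, pvChop]
    by_cases h : c - l > g
    · rw [if_pos h, if_neg (by omega)]
      rw [ih c c, pvGo]
    · rw [if_neg h, if_pos (by omega), ih s c]

-- ---- B side: the breaks/bounds construction equals pvGo ----

def pvBrk (g : Int) (ts : List Int) : List Int :=
  (PySem.List.pyRange 1 (ts.length : Int) 1).filter
    (fun i => decide (PySem.List.pyGetD ts i 0 - PySem.List.pyGetD ts (i-1) 0 > g))

def pvBCore (g : Int) (ts : List Int) : List (Int × Int) :=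
  ((0 :: (pvBrk g ts ++ [(ts.length : Int)])).zip (pvBrk g ts ++ [(ts.length : Int)])).map
    (fun ab => (PySem.List.pyGetD ts ab.1 0, PySem.List.pyGetD ts (ab.2 - 1) 0))

-- reading the cons list one position later
theorem pvGetD_cons_shift (t : Int) (ts : List Int) (i : Int) (h : 1 ≤ i) :
    PySem.List.pyGetD (t :: ts) i 0 = PySem.List.pyGetD ts (i - 1) 0 := by
  obtain ⟨k, rfl⟩ : ∃ k : Nat, i = ((k + 1 : Nat) : Int) := ⟨(i-1).toNat, by omega⟩
  rw [show (((k + 1 : Nat) : Int) - 1) = ((k : Nat) : Int) by push_cast; ring,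
      PySem.List.pyGetD_natCast, PySem.List.pyGetD_natCast]
  simp [List.getD]

theorem pvRange_shift (n : Int) (h : 1 ≤ n) :
    PySem.List.pyRange 1 (n + 1) 1 = 1 :: (PySem.List.pyRange 1 n 1).map (· + 1) := by
  rw [PySem.List.pyRange_one, PySem.List.pyRange_one]
  obtain ⟨m, hm⟩ : ∃ m : Nat, (n + 1 - 1).toNat = m + 1 := ⟨(n-1).toNat, by omega⟩
  rw [hm, List.range_succ_eq_map]
  have h2 : (n - 1).toNat = m := by omega
  rw [h2]
  simp only [List.map_cons, List.map_map]
  rw [List.cons_eq_cons]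
  refine ⟨by norm_num, ?_⟩
  apply List.map_congr_left
  intro a _
  simp [Function.comp]
  ring

theorem pvBrk_mem_ge_one (g : Int) (ts : List Int) : ∀ x ∈ pvBrk g ts, 1 ≤ x := by
  intro x hx
  have := (List.mem_filter.mp hx).1
  exact (PySem.List.mem_pyRange_one.mp this).1

theorem pvBrk_cons (g t r : Int) (rest : List Int) :
    pvBrk g (t :: r :: rest) =
      (if r - t > g then [1] else []) ++ (pvBrk g (r :: rest)).map (· + 1) := by
  have h1 : (1:Int) ≤ ((r :: rest).length : Int) := by simp
  unfold pvBrk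
  rw [show ((t :: r :: rest).length : Int) = ((r :: rest).length : Int) + 1 by
        push_cast [List.length_cons]; ring]
  rw [pvRange_shift _ h1, List.filter_cons, List.filter_map]
  have hhead : PySem.List.pyGetD (t :: r :: rest) 1 0 - PySem.List.pyGetD (t :: r :: rest) (1-1) 0 = r - t := by
    rw [pvGetD_cons_shift t (r::rest) 1 (by omega)]
    norm_num [PySem.List.pyGetD_zero_cons]
  rw [hhead]
  have hfc : List.filter
        ((fun i => decide (PySem.List.pyGetD (t :: r :: rest) i 0 - PySem.List.pyGetD (t :: r :: rest) (i - 1) 0 > g)) ∘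
          fun x => x + 1)
        (PySem.List.pyRange 1 ((r :: rest).length : Int) 1)
      = List.filter (fun i => decide (PySem.List.pyGetD (r :: rest) i 0 - PySem.List.pyGetD (r :: rest) (i - 1) 0 > g))
        (PySem.List.pyRange 1 ((r :: rest).length : Int) 1) := by
    apply List.filter_congr
    intro i hi
    have h1i : 1 ≤ i := (PySem.List.mem_pyRange_one.mp hi).1
    simp only [Function.comp]
    rw [pvGetD_cons_shift t (r::rest) (i+1) (by omega),
        show i + 1 - 1 = i from by ring,
        pvGetD_cons_shift t (r::rest) i h1i]
  simp only [gt_iff_lt, List.length_cons, Nat.cast_add, Nat.cast_one] at hfc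
  by_cases hrt : r - t > g
  · simp [hfc, hrt]
  · simp [hfc, hrt]

theorem pvMap_shift (t : Int) (ts' : List Int) (l : List (Int × Int))
    (hl : ∀ ab ∈ l, 0 ≤ ab.1 ∧ 1 ≤ ab.2) :
    (l.map (Prod.map (· + 1) (· + 1))).map
        (fun ab => (PySem.List.pyGetD (t :: ts') ab.1 0, PySem.List.pyGetD (t :: ts') (ab.2 - 1) 0))
      = l.map (fun ab => (PySem.List.pyGetD ts' ab.1 0, PySem.List.pyGetD ts' (ab.2 - 1) 0)) := by
  rw [List.map_map]
  apply List.map_congr_left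
  intro ab hab
  obtain ⟨ha, hb⟩ := hl ab hab
  simp only [Function.comp, Prod.map]
  rw [pvGetD_cons_shift t ts' (ab.1 + 1) (by omega),
      show ab.1 + 1 - 1 = ab.1 from by ring,
      show ab.2 + 1 - 1 = ab.2 from by ring,
      pvGetD_cons_shift t ts' ab.2 hb]

theorem pvBCore_eq_go (g : Int) (ts : List Int) (h : ts ≠ []) :
    pvBCore g ts = pvGo g ts := by
  induction ts with
  | nil => exact absurd rfl h
  | cons t ts ih =>
    rcases ts with _ | ⟨r, rest⟩
    · -- singleton
      show pvBCore g [t] = pvGo g [t]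
      rw [pvGo]
      simp [pvBCore, pvBrk, pvChop, pvGo]
    · have hne : (r :: rest) ≠ [] := by simp
      have ih' := ih hne
      -- the boundary list of the tail, with every element ≥ 1
      set q' : List Int := pvBrk g (r :: rest) ++ [((r :: rest).length : Int)] with hq'
      have hq1 : ∀ x ∈ q', 1 ≤ x := by
        intro x hx
        rcases List.mem_append.mp hx with hx | hx
        · exact pvBrk_mem_ge_one g _ x hx
        · simp only [List.mem_singleton] at hx
          subst hx; simp
      have hlen : ((t :: r :: rest).length : Int) = ((r :: rest).length : Int) + 1 := by
        push_cast [List.length_cons]; ring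
      have hqmap : pvBrk g (t :: r :: rest) ++ [((t :: r :: rest).length : Int)]
          = (if r - t > g then [1] else []) ++ q'.map (· + 1) := by
        rw [pvBrk_cons, hq', hlen]
        simp [List.map_append]
      by_cases hgap : r - t > g
      · -- new region starts at r
        rw [if_pos hgap] at hqmap
        have hBig : pvBCore g (t :: r :: rest) = (t, t) :: pvBCore g (r :: rest) := by
          unfold pvBCore
          rw [hqmap]
          have hz : (0 :: (1 :: q'.map (· + 1))).zip (1 :: q'.map (· + 1))
              = (0, 1) :: ((0 :: q').zip q').map (Prod.map (· + 1) (· + 1)) := by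
            have hc : (1 : Int) :: q'.map (· + 1) = (0 :: q').map (· + 1) := by simp
            rw [List.zip_cons_cons, hc, List.zip_map]
          rw [show ([1] ++ q'.map (· + 1)) = 1 :: q'.map (· + 1) from rfl, hz]
          rw [List.map_cons, pvMap_shift t (r :: rest) _
              (by intro ab hab
                  obtain ⟨h1, h2⟩ := List.of_mem_zip hab
                  rcases List.mem_cons.mp h1 with h1 | h1
                  · constructor; · omega
                    · exact hq1 _ h2
                  · exact ⟨le_of_lt (by have := hq1 _ h1; omega), hq1 _ h2⟩)]
          rw [← hq']
          congr 1
          simp [PySem.List.pyGetD_zero_cons]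
        rw [hBig, ih']
        rw [show pvGo g (t :: r :: rest)
              = (t, (pvChop g t (r :: rest)).1) :: pvGo g (pvChop g t (r :: rest)).2 from by
            rw [pvGo]]
        rw [show pvChop g t (r :: rest) = (t, r :: rest) from by rw [pvChop, if_neg (by omega)]]
      · -- region continues through r
        rw [if_neg hgap] at hqmap
        obtain ⟨q0, qt, hq0⟩ : ∃ q0 qt, q' = q0 :: qt := by
          rcases q' with _ | ⟨a, b⟩
          · exact absurd (List.append_eq_nil_iff.mp hq'.symm).2 (by simp)
          · exact ⟨a, b, rfl⟩
        have hq01 : 1 ≤ q0 := hq1 q0 (by rw [hq0]; simp)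
        have hBig : pvBCore g (t :: r :: rest)
            = (t, PySem.List.pyGetD (r :: rest) (q0 - 1) 0) ::
              ((q0 :: qt).zip qt).map
                (fun ab => (PySem.List.pyGetD (r :: rest) ab.1 0, PySem.List.pyGetD (r :: rest) (ab.2 - 1) 0)) := by
          unfold pvBCore
          rw [hqmap, hq0]
          have hz : (0 :: ((q0 :: qt).map (· + 1))).zip ((q0 :: qt).map (· + 1))
              = (0, q0 + 1) :: ((q0 :: qt).zip qt).map (Prod.map (· + 1) (· + 1)) := by
            rw [List.map_cons, List.zip_cons_cons,
                show (q0 + 1) :: qt.map (· + 1) = (q0 :: qt).map (· + 1) from by simp,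
                List.zip_map]
          rw [show (([] : List Int) ++ (q0 :: qt).map (· + 1)) = (q0 :: qt).map (· + 1) from rfl, hz]
          rw [List.map_cons, pvMap_shift t (r :: rest) _
              (by intro ab hab
                  obtain ⟨h1, h2⟩ := List.of_mem_zip hab
                  refine ⟨le_of_lt (by have := hq1 _ (by rw [hq0]; exact h1); omega), ?_⟩
                  exact hq1 _ (by rw [hq0]; exact List.mem_cons_of_mem _ h2))]
          congr 1
          simp only [PySem.List.pyGetD_zero_cons]
          rw [show q0 + 1 - 1 = q0 from by ring,
              pvGetD_cons_shift t (r :: rest) q0 hq01]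
        have hSmall : pvBCore g (r :: rest)
            = (PySem.List.pyGetD (r :: rest) 0 0, PySem.List.pyGetD (r :: rest) (q0 - 1) 0) ::
              ((q0 :: qt).zip qt).map
                (fun ab => (PySem.List.pyGetD (r :: rest) ab.1 0, PySem.List.pyGetD (r :: rest) (ab.2 - 1) 0)) := by
          unfold pvBCore
          rw [← hq', hq0]
          rfl
        have hkey := hSmall.symm.trans ih'
        rw [pvGo] at hkey
        injection hkey with h1 h2
        have he : PySem.List.pyGetD (r :: rest) (q0 - 1) 0 = (pvChop g r rest).1 :=
          congrArg Prod.snd h1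
        rw [hBig, he, h2]
        rw [show pvGo g (t :: r :: rest)
              = (t, (pvChop g t (r :: rest)).1) :: pvGo g (pvChop g t (r :: rest)).2 from by
            rw [pvGo]]
        rw [show pvChop g t (r :: rest) = pvChop g r rest from by rw [pvChop, if_pos (by omega)]]

-- ===== VERDICT (by name: the statement is the Claim_ definition above) =====
theorem group_cp_regions_spec : Claim_equal_group_cp_regions := by
  intro timestamps indices min_gap _hdom _hpre
  unfold Spec_group_cp_regions group_cp_regions group_cp_regions_alt
  by_cases hlen : indices.length = 0
  · have : indices = [] := List.length_eq_zero_iff.mp hlen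
    subst this
    simp
  · rw [if_neg hlen, if_neg hlen]
    rcases hs : PySem.List.sorted indices id false with _ | ⟨t, rest⟩
    · exfalso
      have := PySem.List.length_sorted (xs := indices) (key := id) (rev := false)
      rw [hs] at this
      simp at this
      omega
    · simp only [PySem.List.slice_from_one, List.tail_cons, PySem.List.pyGetD_zero_cons,
        List.map_cons]
      rw [pvFold_eq_aloop timestamps min_gap rest t
            (PySem.List.pyGetD timestamps t 0) []]
      rw [pvALoop_eq_go]
      have hb := pvBCore_eq_go min_gap
        ((PySem.List.sorted indices id).map (fun i => PySem.List.pyGetD timestamps i 0))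
        (by rw [hs]; simp)
      unfold pvBCore pvBrk at hb
      rw [hs] at hb
      simp only [List.map_cons] at hb
      rw [hb]
      rw [pvGo]
      simp
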